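-- pv_equiv track=rewrite | github.com/lulugaby/2048 | 2048/2048Game.py | shift_items_left
-- ===== SOURCE A (Python) =====
-- def shift_items_left(values):
--     ''' shifts your items left'''
--     stop = 0
--     for item in range(4):
--         if item != 0:
--             if values[0] != 0:
--                 stop = 0
--                 if values[1] != 0:
--                         stop = 1
--                         if values[2] != 0:
--                             stop = 2
--         while values[item] != 0 and values[item - 1] == 0 and item != stop: ## something went wrong
--             values[item - 1] = values[item]
--             values[item] = 0
--             item -= 1
--     return values
-- ===== SOURCE B (Python) =====
-- def shift_items_left(values):
--     ''' shifts your items left'''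
--     # compact the nonzero entries of the first four slots to the left, pad with zeros
--     nonzero = [v for v in values[:4] if v != 0]
--     for i in range(4):
--         values[i] = nonzero[i] if i < len(nonzero) else 0
--     return values
-- ===== Notes on version B (the rewrite author's own statement) =====
-- stated objective: simpler
-- what changed: Replaces A's stop-tracking outer loop with an inner bubble-style while that shifts one cell at a time by a single compaction: collect the nonzero entries of the first four slots and write them back left-aligned, padded with zeros.
import Mathlib
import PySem

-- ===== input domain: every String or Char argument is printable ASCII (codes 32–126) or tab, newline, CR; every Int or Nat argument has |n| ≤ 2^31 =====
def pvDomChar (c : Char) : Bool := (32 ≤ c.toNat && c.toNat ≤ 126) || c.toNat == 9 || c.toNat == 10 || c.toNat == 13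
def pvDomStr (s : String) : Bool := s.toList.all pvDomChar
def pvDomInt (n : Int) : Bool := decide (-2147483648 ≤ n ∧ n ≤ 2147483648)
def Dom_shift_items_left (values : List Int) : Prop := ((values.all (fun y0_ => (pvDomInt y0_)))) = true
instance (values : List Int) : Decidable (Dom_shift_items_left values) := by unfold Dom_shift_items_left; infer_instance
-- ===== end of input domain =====

-- B changes the algorithm (single compaction instead of A's stop/while shifting); return-value
-- equivalence only — both Pythons also mutate the argument list in place in the same way.

-- ===== PORT A =====
-- values[i] read; every read is in range on Pre_ (length ≥ 4, indices in [-1,3]), so the default is never used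
def pvGetA (xs : List Int) (i : Int) : Int := PySem.List.pyGetD xs i 0

-- the inner 'while' loop; fuel ≥ 4 suffices since item starts ≤ 3 and strictly decreases, a totality guard only
def whileShiftA : List Int → Int → Int → Nat → List Int
  | vals, _, _, 0 => vals
  | vals, item, stop, fuel+1 =>
    if pvGetA vals item ≠ 0 ∧ pvGetA vals (item-1) = 0 ∧ item ≠ stop then
      whileShiftA (PySem.List.pySetD (PySem.List.pySetD vals (item-1) (pvGetA vals item)) item 0)
        (item-1) stop fuel
    else vals

def shift_items_left (values : List Int) : List Int :=
  ((PySem.List.pyRange 0 4 1).foldl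
    (fun (st : List Int × Int) item =>
      let vals := st.1
      let stop :=
        if item ≠ 0 then
          (if pvGetA vals 0 ≠ 0 then
            (if pvGetA vals 1 ≠ 0 then (if pvGetA vals 2 ≠ 0 then 2 else 1) else 0)
           else st.2)
        else st.2
      (whileShiftA vals item stop 4, stop))
    (values, (0 : Int))).1

-- ===== PORT B =====
def shift_items_left_alt (values : List Int) : List Int :=
  let nonzero := (PySem.List.slice values none (some 4)).filter (fun v => v ≠ 0)
  (PySem.List.pyRange 0 4 1).foldl
    (fun vals i =>
      PySem.List.pySetD vals i
        (if i < (nonzero.length : Int) then PySem.List.pyGetD nonzero i 0 else 0))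
    values

-- ===== PRECONDITION & SPEC =====
-- A indexes values[0..3], so it raises IndexError on lists shorter than 4 (B does too)
def Pre_shift_items_left (values : List Int) : Prop := 4 ≤ values.length
instance (values : List Int) : Decidable (Pre_shift_items_left values) := by
  unfold Pre_shift_items_left; infer_instance

def pvWitness_shift_items_left : List Int := [2, 0, 2, 4, 7]

def Spec_shift_items_left (values : List Int) (out : List Int) : Prop := out = shift_items_left_alt values
instance (values : List Int) (out : List Int) : Decidable (Spec_shift_items_left values out) := by unfold Spec_shift_items_left; infer_instance

-- ===== CLAIM (what is proved, stated in full; the proofs are below) =====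
def Claim_equal_shift_items_left : Prop := ∀ (values : List Int), Dom_shift_items_left values → Pre_shift_items_left values → Spec_shift_items_left values (shift_items_left values)

-- ===== LEMMAS AND PROOFS =====
theorem pyRange04 : PySem.List.pyRange 0 4 1 = [0, 1, 2, 3] := by decide

theorem wsA0 (v : List Int) (i s : Int) : whileShiftA v i s 0 = v := rfl
theorem wsA1 (v : List Int) (i s : Int) : whileShiftA v i s 1 =
    (if pvGetA v i ≠ 0 ∧ pvGetA v (i-1) = 0 ∧ i ≠ s then
      whileShiftA (PySem.List.pySetD (PySem.List.pySetD v (i-1) (pvGetA v i)) i 0) (i-1) s 0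
    else v) := rfl
theorem wsA2 (v : List Int) (i s : Int) : whileShiftA v i s 2 =
    (if pvGetA v i ≠ 0 ∧ pvGetA v (i-1) = 0 ∧ i ≠ s then
      whileShiftA (PySem.List.pySetD (PySem.List.pySetD v (i-1) (pvGetA v i)) i 0) (i-1) s 1
    else v) := rfl
theorem wsA3 (v : List Int) (i s : Int) : whileShiftA v i s 3 =
    (if pvGetA v i ≠ 0 ∧ pvGetA v (i-1) = 0 ∧ i ≠ s then
      whileShiftA (PySem.List.pySetD (PySem.List.pySetD v (i-1) (pvGetA v i)) i 0) (i-1) s 2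
    else v) := rfl
theorem wsA4 (v : List Int) (i s : Int) : whileShiftA v i s 4 =
    (if pvGetA v i ≠ 0 ∧ pvGetA v (i-1) = 0 ∧ i ≠ s then
      whileShiftA (PySem.List.pySetD (PySem.List.pySetD v (i-1) (pvGetA v i)) i 0) (i-1) s 3
    else v) := rfl

theorem getD1 (x y : Int) (l : List Int) (d : Int) : PySem.List.pyGetD (x :: y :: l) 1 d = y := by
  rw [show (1 : Int) = ((1 : Nat) : Int) by norm_num, PySem.List.pyGetD_natCast]; rfl
theorem getD2 (x y z : Int) (l : List Int) (d : Int) :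
    PySem.List.pyGetD (x :: y :: z :: l) 2 d = z := by
  rw [show (2 : Int) = ((2 : Nat) : Int) by norm_num, PySem.List.pyGetD_natCast]; rfl
theorem getD3 (x y z w : Int) (l : List Int) (d : Int) :
    PySem.List.pyGetD (x :: y :: z :: w :: l) 3 d = w := by
  rw [show (3 : Int) = ((3 : Nat) : Int) by norm_num, PySem.List.pyGetD_natCast]; rfl

theorem setD0 (x : Int) (l : List Int) (v : Int) : PySem.List.pySetD (x :: l) 0 v = v :: l := by
  rw [show (0 : Int) = ((0 : Nat) : Int) by norm_num, PySem.List.pySetD_natCast]; rfl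
theorem setD1 (x y : Int) (l : List Int) (v : Int) :
    PySem.List.pySetD (x :: y :: l) 1 v = x :: v :: l := by
  rw [show (1 : Int) = ((1 : Nat) : Int) by norm_num, PySem.List.pySetD_natCast]; rfl
theorem setD2 (x y z : Int) (l : List Int) (v : Int) :
    PySem.List.pySetD (x :: y :: z :: l) 2 v = x :: y :: v :: l := by
  rw [show (2 : Int) = ((2 : Nat) : Int) by norm_num, PySem.List.pySetD_natCast]; rfl
theorem setD3 (x y z w : Int) (l : List Int) (v : Int) :
    PySem.List.pySetD (x :: y :: z :: w :: l) 3 v = x :: y :: z :: v :: l := by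
  rw [show (3 : Int) = ((3 : Nat) : Int) by norm_num, PySem.List.pySetD_natCast]; rfl

theorem slice4 (x y z w : Int) (l : List Int) :
    PySem.List.slice (x :: y :: z :: w :: l) none (some 4) = [x, y, z, w] := by
  rw [show (4 : Int) = ((4 : Nat) : Int) by norm_num, PySem.List.slice_to_natCast]; rfl

theorem main_eq (a b c d : Int) (rest : List Int) :
    shift_items_left (a :: b :: c :: d :: rest) = shift_items_left_alt (a :: b :: c :: d :: rest) := by
  by_cases ha : a = 0 <;> by_cases hb : b = 0 <;> by_cases hc : c = 0 <;> by_cases hd : d = 0 <;>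
    simp [shift_items_left, shift_items_left_alt, wsA4, wsA3, wsA2, wsA1, wsA0, pyRange04,
      pvGetA, getD1, getD2, getD3, setD0, setD1, setD2, setD3, slice4,
      ha, hb, hc, hd]

-- ===== VERDICT (by name: the statement is the Claim_ definition above) =====
theorem shift_items_left_spec : Claim_equal_shift_items_left := by
  intro values _ hpre
  unfold Spec_shift_items_left
  match values, hpre with
  | a :: b :: c :: d :: rest, _ => exact main_eq a b c d rest
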